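-- pv_equiv track=rewrite | github.com/paiml/depyler | examples/hard_realworld_diff.py | compute_diff_ops
-- ===== SOURCE A (Python) =====
-- def diff_lcs_table(lines_a: list[str], lines_b: list[str]) -> list[list[int]]:
--     """Build LCS (longest common subsequence) table for line lists."""
--     m: int = len(lines_a)
--     n: int = len(lines_b)
--     table: list[list[int]] = []
--     ri: int = 0
--     while ri <= m:
--         row: list[int] = []
--         ci: int = 0
--         while ci <= n:
--             row.append(0)
--             ci = ci + 1
--         table.append(row)
--         ri = ri + 1
--     i: int = 1
--     while i <= m:
--         j: int = 1
--         while j <= n: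
--             if lines_a[i - 1] == lines_b[j - 1]:
--                 table[i][j] = table[i - 1][j - 1] + 1
--             else:
--                 up: int = table[i - 1][j]
--                 left: int = table[i][j - 1]
--                 if up > left:
--                     table[i][j] = up
--                 else:
--                     table[i][j] = left
--             j = j + 1
--         i = i + 1
--     return table
--
-- def compute_diff_ops(lines_a: list[str], lines_b: list[str]) -> list[list[str]]:
--     """Compute diff operations. Returns [[op, line], ...].
--     ops: 'same', 'del', 'add'."""
--     table: list[list[int]] = diff_lcs_table(lines_a, lines_b)
--     result: list[list[str]] = []
--     i: int = len(lines_a)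
--     j: int = len(lines_b)
--     while i > 0 or j > 0:
--         if i > 0 and j > 0 and lines_a[i - 1] == lines_b[j - 1]:
--             result.append(["same", lines_a[i - 1]])
--             i = i - 1
--             j = j - 1
--         elif j > 0 and (i == 0 or table[i][j - 1] >= table[i - 1][j]):
--             result.append(["add", lines_b[j - 1]])
--             j = j - 1
--         else:
--             result.append(["del", lines_a[i - 1]])
--             i = i - 1
--     # Reverse
--     reversed_result: list[list[str]] = []
--     ri: int = len(result) - 1
--     while ri >= 0:
--         reversed_result.append(result[ri])
--         ri = ri - 1
--     return reversed_result
-- ===== SOURCE B (Python) =====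
-- def _lower_bound(xs, v):
--     """index of first element >= v in sorted xs (hand-rolled bisect_left)."""
--     lo, hi = 0, len(xs)
--     while lo < hi:
--         mid = (lo + hi) // 2
--         if xs[mid] < v:
--             lo = mid + 1
--         else:
--             hi = mid
--     return lo
--
--
-- def _count_le(xs, v):
--     """number of elements <= v in sorted xs (hand-rolled bisect_right)."""
--     lo, hi = 0, len(xs)
--     while lo < hi:
--         mid = (lo + hi) // 2
--         if xs[mid] <= v:
--             lo = mid + 1
--         else:
--             hi = mid
--     return lo
--
--
-- def compute_diff_ops(lines_a: list[str], lines_b: list[str]) -> list[list[str]]: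
--     """Diff via Hunt-Szymanski threshold lists: each DP row is represented by the
--     strictly increasing list of minimal b-positions reaching each LCS length
--     (thr[k] = least j with LCS(a[:i], b[:j]) == k+1); rows are updated at match
--     positions only, and the backtrack recovers lengths by binary-searched counts."""
--     n = len(lines_b)
--     thr = []          # threshold list for the current row
--     rows = [[]]       # snapshot per row
--     for line in lines_a:
--         j = n
--         while j >= 1:          # match positions processed in decreasing order
--             if lines_b[j - 1] == line:
--                 k = _lower_bound(thr, j)
--                 if k == len(thr):
--                     thr.append(j)
--                 else:
--                     thr[k] = j   # lower the threshold for length k+1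
--             j -= 1
--         rows.append(thr.copy())
--     ops = []
--     i, j = len(lines_a), n
--     while i > 0 or j > 0:
--         if i > 0 and j > 0 and lines_a[i - 1] == lines_b[j - 1]:
--             ops.append(["same", lines_a[i - 1]])
--             i -= 1
--             j -= 1
--         elif j > 0 and (i == 0 or _count_le(rows[i], j - 1) >= _count_le(rows[i - 1], j)):
--             ops.append(["add", lines_b[j - 1]])
--             j -= 1
--         else:
--             ops.append(["del", lines_a[i - 1]])
--             i -= 1
--     return ops[::-1]
-- ===== Notes on version B (the rewrite author's own statement) =====
-- stated objective: faster
-- what changed: B replaces the full m*n LCS length table by Hunt-Szymanski threshold lists (per row, the strictly increasing list of minimal b-positions reaching each LCS length, updated by binary search at match positions only) and the backtrack recovers the needed lengths as binary-searched counts of thresholds.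
import Mathlib
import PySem

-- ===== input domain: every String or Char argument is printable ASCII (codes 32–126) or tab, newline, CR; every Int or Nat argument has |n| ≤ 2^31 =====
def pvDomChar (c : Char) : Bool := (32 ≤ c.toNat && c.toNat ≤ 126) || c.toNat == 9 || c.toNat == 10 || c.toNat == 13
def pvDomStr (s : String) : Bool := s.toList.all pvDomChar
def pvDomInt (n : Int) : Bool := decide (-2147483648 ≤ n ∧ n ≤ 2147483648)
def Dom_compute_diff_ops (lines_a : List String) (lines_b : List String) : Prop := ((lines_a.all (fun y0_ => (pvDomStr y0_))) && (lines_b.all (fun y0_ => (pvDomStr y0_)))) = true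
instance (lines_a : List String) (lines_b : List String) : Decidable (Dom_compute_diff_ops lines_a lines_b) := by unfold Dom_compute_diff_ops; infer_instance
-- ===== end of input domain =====

-- B replaces A's full m×n LCS length table by Hunt–Szymanski threshold lists (per row, the
-- strictly increasing list of minimal b-positions reaching each LCS length, updated by binary
-- search at match positions only); the backtrack recovers lengths as binary-searched counts.

-- ===== PORT A =====
-- indices are Nat and always in range in the Python here, so xs[i] is ported as getD (exact on this use)
def pvGetS (xs : List String) (i : Nat) : String := xs.getD i ""
def pvGet2 (t : List (List Int)) (i j : Nat) : Int := (t.getD i []).getD j 0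
def pvSet2 (t : List (List Int)) (i j : Nat) (v : Int) : List (List Int) :=
  t.set i ((t.getD i []).set j v)

-- the inner 'while j <= n' fill loop of diff_lcs_table, for row i
def pvInnerA (lines_a lines_b : List String) (i : Nat) (tIn : List (List Int)) : List (List Int) :=
  (List.range lines_b.length).foldl (fun t j' =>
    let j := j' + 1
    if pvGetS lines_a (i-1) = pvGetS lines_b (j-1) then
      pvSet2 t i j (pvGet2 t (i-1) (j-1) + 1)
    else
      let up := pvGet2 t (i-1) j
      let left := pvGet2 t i (j-1)
      if up > left then pvSet2 t i j up else pvSet2 t i j left) tIn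

def diff_lcs_table (lines_a lines_b : List String) : List (List Int) :=
  let m := lines_a.length
  let n := lines_b.length
  let zrow : List Int := (List.range (n+1)).foldl (fun r _ => r ++ [0]) []
  let table0 : List (List Int) := (List.range (m+1)).foldl (fun t _ => t ++ [zrow]) []
  (List.range m).foldl (fun t i' => pvInnerA lines_a lines_b (i'+1) t) table0

-- the backtrack while-loop; fuel = i + j at the call, which the loop never exhausts
def pvBackA (lines_a lines_b : List String) (t : List (List Int)) :
    Nat → Nat → Nat → List (List String)
  | 0, _, _ => []
  | fuel+1, i, j =>
    if 0 < i ∨ 0 < j then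
      if 0 < i ∧ 0 < j ∧ pvGetS lines_a (i-1) = pvGetS lines_b (j-1) then
        ["same", pvGetS lines_a (i-1)] :: pvBackA lines_a lines_b t fuel (i-1) (j-1)
      else if 0 < j ∧ (i = 0 ∨ pvGet2 t i (j-1) ≥ pvGet2 t (i-1) j) then
        ["add", pvGetS lines_b (j-1)] :: pvBackA lines_a lines_b t fuel i (j-1)
      else
        ["del", pvGetS lines_a (i-1)] :: pvBackA lines_a lines_b t fuel (i-1) j
    else []

-- A's manual reversal loop (reads result[ri] for ri = len-1 .. 0)
def pvRevA (r : List (List String)) : Nat → List (List String)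
  | 0 => []
  | k+1 => r.getD k [] :: pvRevA r k

def compute_diff_ops (lines_a : List String) (lines_b : List String) : List (List String) :=
  let table := diff_lcs_table lines_a lines_b
  let result := pvBackA lines_a lines_b table (lines_a.length + lines_b.length)
                  lines_a.length lines_b.length
  pvRevA result result.length

-- ===== PORT B =====
-- _lower_bound: index of first element ≥ v in sorted xs (hand-rolled bisect_left);
-- xs[mid] is always in range in the Python, so ported as getD (exact on this use)
def pvLowerAux (xs : List Nat) (v : Nat) (lo hi : Nat) : Nat :=
  if lo < hi then
    if xs.getD ((lo + hi) / 2) 0 < v then pvLowerAux xs v ((lo + hi) / 2 + 1) hi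
    else pvLowerAux xs v lo ((lo + hi) / 2)
  else lo
termination_by hi - lo
decreasing_by all_goals omega

def pvLower (xs : List Nat) (v : Nat) : Nat := pvLowerAux xs v 0 xs.length

-- _count_le: number of elements ≤ v in sorted xs (hand-rolled bisect_right)
def pvCountLeAux (xs : List Nat) (v : Nat) (lo hi : Nat) : Nat :=
  if lo < hi then
    if xs.getD ((lo + hi) / 2) 0 ≤ v then pvCountLeAux xs v ((lo + hi) / 2 + 1) hi
    else pvCountLeAux xs v lo ((lo + hi) / 2)
  else lo
termination_by hi - lo
decreasing_by all_goals omega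

def pvCountLe (xs : List Nat) (v : Nat) : Nat := pvCountLeAux xs v 0 xs.length

-- the body of 'if lines_b[j-1] == line': place match position j into the threshold list
def pvPlace (thr : List Nat) (j : Nat) : List Nat :=
  let k := pvLower thr j
  if k = thr.length then thr ++ [j] else thr.set k j

-- the 'while j >= 1' scan over b's positions, in decreasing order
def pvRowThr (line : String) (b : List String) : Nat → List Nat → List Nat
  | 0, thr => thr
  | j+1, thr => pvRowThr line b j (if pvGetS b j = line then pvPlace thr (j+1) else thr)

-- the outer 'for line in lines_a' loop collecting per-row snapshots
def pvRowsB (a b : List String) : List (List Nat) :=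
  (a.foldl (fun (st : List (List Nat) × List Nat) line =>
      let thr := pvRowThr line b b.length st.2
      (st.1 ++ [thr], thr)) ([[]], [])).1

-- the backtrack while-loop; fuel = i + j at the call, which the loop never exhausts
def pvWalkB (a b : List String) (rows : List (List Nat)) :
    Nat → Nat → Nat → List (List String)
  | 0, _, _ => []
  | fuel+1, i, j =>
    if 0 < i ∨ 0 < j then
      if 0 < i ∧ 0 < j ∧ pvGetS a (i-1) = pvGetS b (j-1) then
        ["same", pvGetS a (i-1)] :: pvWalkB a b rows fuel (i-1) (j-1)
      else if 0 < j ∧ (i = 0 ∨ pvCountLe (rows.getD i []) (j-1) ≥ pvCountLe (rows.getD (i-1) []) j) then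
        ["add", pvGetS b (j-1)] :: pvWalkB a b rows fuel i (j-1)
      else
        ["del", pvGetS a (i-1)] :: pvWalkB a b rows fuel (i-1) j
    else []

def compute_diff_ops_alt (lines_a : List String) (lines_b : List String) : List (List String) :=
  let rows := pvRowsB lines_a lines_b
  (pvWalkB lines_a lines_b rows (lines_a.length + lines_b.length)
    lines_a.length lines_b.length).reverse

-- ===== PRECONDITION & SPEC =====
def Spec_compute_diff_ops (lines_a : List String) (lines_b : List String) (out : List (List String)) : Prop := out = compute_diff_ops_alt lines_a lines_b
instance (lines_a : List String) (lines_b : List String) (out : List (List String)) : Decidable (Spec_compute_diff_ops lines_a lines_b out) := by unfold Spec_compute_diff_ops; infer_instance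

-- ===== CLAIM (what is proved, stated in full; the proofs are below) =====
def Claim_equal_compute_diff_ops : Prop := ∀ (lines_a : List String) (lines_b : List String), Dom_compute_diff_ops lines_a lines_b → Spec_compute_diff_ops lines_a lines_b (compute_diff_ops lines_a lines_b)

-- ===== LEMMAS AND PROOFS =====

-- generic getD lemmas
lemma pv_getD_map_range {α : Type} (f : Nat → α) (d : α) {i N : Nat} (h : i < N) :
    ((List.range N).map f).getD i d = f i := by
  simp [List.getD_eq_getElem?_getD, List.getElem?_map, List.getElem?_range, h]

lemma pv_getD_replicate {α : Type} (n i : Nat) (x d : α) (h : i < n) :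
    (List.replicate n x).getD i d = x := by
  simp [List.getD_eq_getElem?_getD, List.getElem?_replicate, h]

lemma pv_foldl_snoc_const {α : Type} (x : α) :
    ∀ (k : Nat) (init : List α),
      (List.range k).foldl (fun r (_ : Nat) => r ++ [x]) init = init ++ List.replicate k x := by
  intro k
  induction k with
  | zero => simp
  | succ k ih =>
    intro init
    rw [List.range_succ, List.foldl_append, ih]
    simp [List.replicate_succ']

-- the mathematical LCS-length table both ports compute (Int form, matching A's table)
def pvL (a b : List String) : Nat → Nat → Int
  | 0, _ => 0
  | _+1, 0 => 0
  | i+1, j+1 =>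
    if pvGetS a i = pvGetS b j then pvL a b i j + 1
    else max (pvL a b i (j+1)) (pvL a b (i+1) j)

lemma pvL_zero_right (a b : List String) (i : Nat) : pvL a b i 0 = 0 := by
  cases i <;> simp [pvL]

lemma pvL_zero_left (a b : List String) (j : Nat) : pvL a b 0 j = 0 := by
  simp [pvL]

-- ---- pvSet2 / pvGet2 ----
lemma pv_get2_set2_self (t : List (List Int)) (i j : Nat) (v : Int)
    (hi : i < t.length) (hj : j < (t.getD i []).length) :
    pvGet2 (pvSet2 t i j v) i j = v := by
  unfold pvGet2 pvSet2
  rw [List.getD_eq_getElem _ _ hi] at hj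
  simp [List.getD_eq_getElem?_getD, List.getElem?_set, hi, hj]

lemma pv_get2_set2_ne (t : List (List Int)) (i j : Nat) (v : Int) (i' j' : Nat)
    (h : i' ≠ i ∨ j' ≠ j) :
    pvGet2 (pvSet2 t i j v) i' j' = pvGet2 t i' j' := by
  unfold pvGet2 pvSet2
  by_cases hlen : i < t.length
  · by_cases hii : i' = i
    · subst hii
      have hj : j' ≠ j := by tauto
      simp only [List.getD_eq_getElem?_getD, List.getElem?_set, if_pos rfl, hlen, if_true,
        Option.getD_some]
      rw [if_neg (by omega : ¬ j = j')]
    · simp only [List.getD_eq_getElem?_getD, List.getElem?_set]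
      rw [if_neg (by omega : ¬ i = i')]
  · rw [List.set_eq_of_length_le (by omega)]

lemma pv_set2_length (t : List (List Int)) (i j : Nat) (v : Int) :
    (pvSet2 t i j v).length = t.length := by
  unfold pvSet2; simp

lemma pv_set2_row_length (t : List (List Int)) (i j : Nat) (v : Int) (i' : Nat) :
    ((pvSet2 t i j v).getD i' []).length = (t.getD i' []).length := by
  unfold pvSet2
  by_cases hlen : i < t.length
  · by_cases hii : i' = i
    · subst hii
      simp [List.getD_eq_getElem?_getD, List.getElem?_set, hlen]
    · simp only [List.getD_eq_getElem?_getD, List.getElem?_set]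
      rw [if_neg (by omega : ¬ i = i')]
  · rw [List.set_eq_of_length_le (by omega)]

-- shape of a partially filled table
def pvShape (m n : Nat) (t : List (List Int)) : Prop :=
  t.length = m + 1 ∧ ∀ i', (t.getD i' []).length = n + 1 ∨ ¬ i' < m + 1

-- ---- table A characterisation ----
lemma pv_innerA_spec (a b : List String) (i : Nat) (hi1 : 1 ≤ i) (him : i ≤ a.length) :
    ∀ (l : Nat), l ≤ b.length → ∀ (tIn : List (List Int)),
      pvShape a.length b.length tIn →
      (∀ i' j, i' ≤ a.length → j ≤ b.length →
        pvGet2 tIn i' j = if i' < i then pvL a b i' j else 0) →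
      pvShape a.length b.length
        ((List.range l).foldl (fun t j' =>
          if pvGetS a (i-1) = pvGetS b j' then
            pvSet2 t i (j'+1) (pvGet2 t (i-1) j' + 1)
          else
            if pvGet2 t (i-1) (j'+1) > pvGet2 t i j' then
              pvSet2 t i (j'+1) (pvGet2 t (i-1) (j'+1))
            else pvSet2 t i (j'+1) (pvGet2 t i j')) tIn) ∧
      (∀ i' j, i' ≤ a.length → j ≤ b.length →
        pvGet2 ((List.range l).foldl (fun t j' =>
          if pvGetS a (i-1) = pvGetS b j' then
            pvSet2 t i (j'+1) (pvGet2 t (i-1) j' + 1)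
          else
            if pvGet2 t (i-1) (j'+1) > pvGet2 t i j' then
              pvSet2 t i (j'+1) (pvGet2 t (i-1) (j'+1))
            else pvSet2 t i (j'+1) (pvGet2 t i j')) tIn) i' j =
          if i' < i then pvL a b i' j
          else if i' = i ∧ j ≤ l then pvL a b i' j else 0) := by
  intro l
  induction l with
  | zero =>
    intro _ tIn hShape hVals
    refine ⟨hShape, ?_⟩
    intro i' j hI hJ
    simp only [List.range_zero, List.foldl_nil]
    rw [hVals i' j hI hJ]
    split_ifs with h1 h2
    · rfl
    · obtain ⟨rfl, hj0⟩ := h2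
      obtain rfl : j = 0 := by omega
      exact (pvL_zero_right a b _).symm
    · rfl
  | succ l ihl =>
    intro hl tIn hShape hVals
    obtain ⟨pShape, pVals⟩ := ihl (by omega) tIn hShape hVals
    rw [List.range_succ, List.foldl_append, List.foldl_cons, List.foldl_nil]
    set T := (List.range l).foldl (fun t j' =>
          if pvGetS a (i-1) = pvGetS b j' then
            pvSet2 t i (j'+1) (pvGet2 t (i-1) j' + 1)
          else
            if pvGet2 t (i-1) (j'+1) > pvGet2 t i j' then
              pvSet2 t i (j'+1) (pvGet2 t (i-1) (j'+1))
            else pvSet2 t i (j'+1) (pvGet2 t i j')) tIn with hT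
    have r1 : pvGet2 T (i-1) l = pvL a b (i-1) l := by
      rw [pVals (i-1) l (by omega) (by omega), if_pos (by omega)]
    have r2 : pvGet2 T (i-1) (l+1) = pvL a b (i-1) (l+1) := by
      rw [pVals (i-1) (l+1) (by omega) (by omega), if_pos (by omega)]
    have r3 : pvGet2 T i l = pvL a b i l := by
      rw [pVals i l (by omega) (by omega), if_neg (by omega), if_pos ⟨rfl, le_rfl⟩]
    have hlenT : T.length = a.length + 1 := pShape.1
    have hrowT : (T.getD i []).length = b.length + 1 := by
      rcases pShape.2 i with h | h
      · exact h
      · omega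
    have hLrec : pvL a b i (l+1) =
        if pvGetS a (i-1) = pvGetS b l then pvL a b (i-1) l + 1
        else max (pvL a b (i-1) (l+1)) (pvL a b i l) := by
      obtain ⟨i0, rfl⟩ : ∃ i0, i = i0 + 1 := ⟨i - 1, by omega⟩
      simp only [Nat.add_sub_cancel]
      rw [pvL]
    have hstep :
        (if pvGetS a (i-1) = pvGetS b l then
          pvSet2 T i (l+1) (pvGet2 T (i-1) l + 1)
        else
          if pvGet2 T (i-1) (l+1) > pvGet2 T i l then
            pvSet2 T i (l+1) (pvGet2 T (i-1) (l+1))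
          else pvSet2 T i (l+1) (pvGet2 T i l)) =
        pvSet2 T i (l+1) (pvL a b i (l+1)) := by
      by_cases hc : pvGetS a (i-1) = pvGetS b l
      · rw [if_pos hc, r1]
        congr 1
        rw [hLrec, if_pos hc]
      · rw [if_neg hc, r2, r3]
        rw [hLrec, if_neg hc]
        split_ifs with h
        · rw [max_eq_left (le_of_lt h)]
        · rw [max_eq_right (by omega)]
    rw [hstep]
    constructor
    · constructor
      · rw [pv_set2_length, hlenT]
      · intro i'
        rw [pv_set2_row_length]
        exact pShape.2 i'
    · intro i' j hI hJ
      by_cases hij : i' = i ∧ j = l + 1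
      · obtain ⟨rfl, rfl⟩ := hij
        rw [pv_get2_set2_self T _ _ _ (by omega) (by omega)]
        rw [if_neg (by omega), if_pos ⟨rfl, le_rfl⟩]
      · rw [pv_get2_set2_ne T _ _ _ _ _ (by omega), pVals i' j hI hJ]
        split_ifs <;> first | rfl | omega

lemma pv_tableA_get (a b : List String) :
    ∀ i j, i ≤ a.length → j ≤ b.length →
      pvGet2 (diff_lcs_table a b) i j = pvL a b i j := by
  have hzrow : (List.range (b.length+1)).foldl (fun r (_ : Nat) => r ++ [(0:Int)]) [] =
      List.replicate (b.length+1) (0:Int) := by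
    rw [pv_foldl_snoc_const (0:Int) (b.length+1) []]
    simp
  have htable0 : (List.range (a.length+1)).foldl
        (fun t (_ : Nat) => t ++ [List.replicate (b.length+1) (0:Int)]) [] =
      List.replicate (a.length+1) (List.replicate (b.length+1) (0:Int)) := by
    rw [pv_foldl_snoc_const _ (a.length+1) []]
    simp
  have hget0 : ∀ i' j, i' ≤ a.length → j ≤ b.length →
      pvGet2 (List.replicate (a.length+1) (List.replicate (b.length+1) (0:Int))) i' j = 0 := by
    intro i' j hI hJ
    unfold pvGet2
    rw [pv_getD_replicate _ _ _ _ (by omega), pv_getD_replicate _ _ _ _ (by omega)]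
  have main : ∀ k, k ≤ a.length →
      pvShape a.length b.length
        ((List.range k).foldl (fun t i' => pvInnerA a b (i'+1) t)
          (List.replicate (a.length+1) (List.replicate (b.length+1) (0:Int)))) ∧
      (∀ i' j, i' ≤ a.length → j ≤ b.length →
        pvGet2 ((List.range k).foldl (fun t i' => pvInnerA a b (i'+1) t)
          (List.replicate (a.length+1) (List.replicate (b.length+1) (0:Int)))) i' j =
        if i' ≤ k then pvL a b i' j else 0) := by
    intro k
    induction k with
    | zero =>
      intro _
      constructor
      · constructor
        · simp
        · intro i'
          simp only [List.range_zero, List.foldl_nil]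
          by_cases h : i' < a.length + 1
          · left
            unfold List.getD
            rw [List.getElem?_replicate, if_pos h]
            simp
          · right; exact h
      · intro i' j hI hJ
        simp only [List.range_zero, List.foldl_nil]
        rw [hget0 i' j hI hJ]
        split_ifs with h1
        · obtain rfl : i' = 0 := by omega
          exact (pvL_zero_left a b j).symm
        · rfl
    | succ k ihk =>
      intro hk
      obtain ⟨sh, vals⟩ := ihk (by omega)
      rw [List.range_succ, List.foldl_append, List.foldl_cons, List.foldl_nil]
      have vals' : ∀ i' j, i' ≤ a.length → j ≤ b.length →
          pvGet2 ((List.range k).foldl (fun t i' => pvInnerA a b (i'+1) t)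
            (List.replicate (a.length+1) (List.replicate (b.length+1) (0:Int)))) i' j =
          if i' < k + 1 then pvL a b i' j else 0 := by
        intro i' j hI hJ
        rw [vals i' j hI hJ]
        split_ifs <;> first | rfl | omega
      have h := pv_innerA_spec a b (k+1) (by omega) (by omega) b.length le_rfl _ sh vals'
      obtain ⟨sh2, vals2⟩ := h
      refine ⟨sh2, ?_⟩
      intro i' j hI hJ
      rw [show pvInnerA a b (k+1) ((List.range k).foldl (fun t i' => pvInnerA a b (i'+1) t)
            (List.replicate (a.length+1) (List.replicate (b.length+1) (0:Int)))) =
          (List.range b.length).foldl (fun t j' =>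
            if pvGetS a ((k+1)-1) = pvGetS b j' then
              pvSet2 t (k+1) (j'+1) (pvGet2 t ((k+1)-1) j' + 1)
            else
              if pvGet2 t ((k+1)-1) (j'+1) > pvGet2 t (k+1) j' then
                pvSet2 t (k+1) (j'+1) (pvGet2 t ((k+1)-1) (j'+1))
              else pvSet2 t (k+1) (j'+1) (pvGet2 t (k+1) j'))
          ((List.range k).foldl (fun t i' => pvInnerA a b (i'+1) t)
            (List.replicate (a.length+1) (List.replicate (b.length+1) (0:Int)))) from rfl]
      rw [vals2 i' j hI hJ]
      split_ifs <;> first | rfl | omega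
  intro i j hi hj
  unfold diff_lcs_table
  dsimp only
  rw [hzrow, htable0]
  rw [(main a.length le_rfl).2 i j hi hj, if_pos hi]

-- ---- the Nat form of the LCS table, and its monotonicity ----
def pvLn (a b : List String) : Nat → Nat → Nat
  | 0, _ => 0
  | _+1, 0 => 0
  | i+1, j+1 =>
    if pvGetS a i = pvGetS b j then pvLn a b i j + 1
    else max (pvLn a b i (j+1)) (pvLn a b (i+1) j)

lemma pvLn_zero_left (a b : List String) (j : Nat) : pvLn a b 0 j = 0 := by
  simp [pvLn]

lemma pvLn_zero_right (a b : List String) (i : Nat) : pvLn a b i 0 = 0 := by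
  cases i <;> simp [pvLn]

lemma pvL_eq_pvLn (a b : List String) : ∀ i j, pvL a b i j = (pvLn a b i j : Int) := by
  intro i
  induction i with
  | zero => intro j; rw [pvL_zero_left, pvLn_zero_left]; rfl
  | succ i ih =>
    intro j
    induction j with
    | zero => rw [pvL_zero_right, pvLn_zero_right]; rfl
    | succ j ihj =>
      rw [pvL, pvLn]
      split_ifs with h
      · rw [ih j]; push_cast; ring
      · rw [ih (j+1), ihj]
        rw [Nat.cast_max]

lemma pvLn_succ (a b : List String) (i j : Nat) :
    pvLn a b (i+1) (j+1) =
      if pvGetS a i = pvGetS b j then pvLn a b i j + 1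
      else max (pvLn a b i (j+1)) (pvLn a b (i+1) j) := by rw [pvLn]

-- mono in j, and one row adds at most one  (mutual, by induction on i)
lemma pvLn_mono_step (a b : List String) :
    ∀ i, (∀ j, pvLn a b i j ≤ pvLn a b i (j+1)) ∧
         (∀ j, pvLn a b (i+1) j ≤ pvLn a b i j + 1) := by
  intro i
  induction i with
  | zero =>
    have mono : ∀ j, pvLn a b 0 j ≤ pvLn a b 0 (j+1) := by
      intro j; rw [pvLn_zero_left, pvLn_zero_left]
    refine ⟨mono, ?_⟩
    intro j
    induction j with
    | zero => rw [pvLn_zero_right]; omega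
    | succ j ihj =>
      rw [pvLn_succ]
      split_ifs with h
      · have := mono j; omega
      · have h1 := mono j; have h2 := ihj; omega
  | succ i ih =>
    obtain ⟨mono_i, step_i⟩ := ih
    have mono : ∀ j, pvLn a b (i+1) j ≤ pvLn a b (i+1) (j+1) := by
      intro j
      cases j with
      | zero => rw [pvLn_zero_right]; omega
      | succ j =>
        rw [pvLn_succ a b i (j+1)]
        split_ifs with h
        · exact step_i (j+1)
        · omega
    refine ⟨mono, ?_⟩
    intro j
    induction j with
    | zero => rw [pvLn_zero_right]; omega
    | succ j ihj =>
      rw [pvLn_succ a b (i+1) j]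
      split_ifs with h
      · have := mono j; omega
      · have h1 := mono j; have h2 := ihj; omega

lemma pvLn_step_i (a b : List String) (i j : Nat) : pvLn a b (i+1) j ≤ pvLn a b i j + 1 :=
  (pvLn_mono_step a b i).2 j

-- step in j, and mono in i  (mutual, by induction on i)
lemma pvLn_stepj_vert (a b : List String) :
    ∀ i, (∀ j, pvLn a b i (j+1) ≤ pvLn a b i j + 1) ∧
         (∀ j, pvLn a b i j ≤ pvLn a b (i+1) j) := by
  intro i
  induction i with
  | zero =>
    have stepj : ∀ j, pvLn a b 0 (j+1) ≤ pvLn a b 0 j + 1 := by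
      intro j; rw [pvLn_zero_left, pvLn_zero_left]; omega
    refine ⟨stepj, ?_⟩
    intro j; rw [pvLn_zero_left]; omega
  | succ i ih =>
    obtain ⟨stepj_i, vert_i⟩ := ih
    have stepj : ∀ j, pvLn a b (i+1) (j+1) ≤ pvLn a b (i+1) j + 1 := by
      intro j
      rw [pvLn_succ a b i j]
      split_ifs with h
      · have := vert_i j; omega
      · have h1 := stepj_i j; have h2 := vert_i j; omega
    have vert : ∀ j, pvLn a b (i+1) j ≤ pvLn a b (i+1+1) j := by
      intro j
      cases j with
      | zero => rw [pvLn_zero_right, pvLn_zero_right]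
      | succ j =>
        rw [pvLn_succ a b (i+1) j]
        split_ifs with h
        · exact stepj j
        · omega
    exact ⟨stepj, vert⟩

lemma pvLn_step_j (a b : List String) (i j : Nat) : pvLn a b i (j+1) ≤ pvLn a b i j + 1 :=
  (pvLn_stepj_vert a b i).1 j

-- ---- the mid-row mixed function: row i updated at match positions > t ----
def pvMfun (a b : List String) (i t : Nat) : Nat → Nat
  | 0 => pvLn a b i 0
  | j+1 =>
    if j+1 ≤ t then pvLn a b i (j+1)
    else
      if pvGetS b j = pvGetS a i then
        max (max (pvMfun a b i t j) (pvLn a b i (j+1))) (pvLn a b i j + 1)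
      else
        max (pvMfun a b i t j) (pvLn a b i (j+1))

lemma pvMfun_succ (a b : List String) (i t j : Nat) :
    pvMfun a b i t (j+1) =
      if j+1 ≤ t then pvLn a b i (j+1)
      else
        if pvGetS b j = pvGetS a i then
          max (max (pvMfun a b i t j) (pvLn a b i (j+1))) (pvLn a b i j + 1)
        else
          max (pvMfun a b i t j) (pvLn a b i (j+1)) := by rw [pvMfun]

lemma pvMfun_le_t (a b : List String) (i t : Nat) :
    ∀ j, j ≤ t → pvMfun a b i t j = pvLn a b i j := by
  intro j hj
  cases j with
  | zero => rfl
  | succ j => rw [pvMfun_succ, if_pos hj]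

lemma pvMfun_zero (a b : List String) (i : Nat) : ∀ j, pvMfun a b i 0 j = pvLn a b (i+1) j := by
  intro j
  induction j with
  | zero =>
    show pvLn a b i 0 = pvLn a b (i+1) 0
    rw [pvLn_zero_right, pvLn_zero_right]
  | succ j ihj =>
    rw [pvMfun_succ, if_neg (by omega), pvLn_succ a b i j, ihj]
    by_cases h : pvGetS b j = pvGetS a i
    · rw [if_pos h, if_pos h.symm]
      have h1 := pvLn_step_i a b i j
      have h2 := pvLn_step_j a b i j
      omega
    · rw [if_neg h, if_neg (fun hh => h hh.symm)]
      omega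

lemma pvMfun_step_match (a b : List String) (i t : Nat) (ht : 1 ≤ t)
    (hm : pvGetS b (t-1) = pvGetS a i) :
    ∀ j, pvMfun a b i (t-1) j =
      if j < t then pvLn a b i j else max (pvMfun a b i t j) (pvLn a b i (t-1) + 1) := by
  intro j
  induction j with
  | zero => rw [if_pos (by omega)]; rfl
  | succ j ihj =>
    rcases Nat.lt_trichotomy (j+1) t with hlt | heq | hgt
    · rw [if_pos hlt, pvMfun_succ, if_pos (by omega)]
    · -- j + 1 = t
      obtain rfl : t = j + 1 := by omega
      simp only [Nat.add_sub_cancel] at hm ⊢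
      rw [if_neg (by omega), pvMfun_succ a b i j j, if_neg (by omega), if_pos hm,
        pvMfun_le_t a b i j j le_rfl, pvMfun_le_t a b i (j+1) (j+1) le_rfl]
      have hmono := (pvLn_mono_step a b i).1 j
      omega
    · -- j + 1 > t, so j ≥ t
      rw [if_neg (show ¬ j + 1 < t by omega), pvMfun_succ a b i (t-1) j,
        if_neg (show ¬ j + 1 ≤ t - 1 by omega), pvMfun_succ a b i t j,
        if_neg (show ¬ j + 1 ≤ t by omega), ihj, if_neg (show ¬ j < t by omega)]
      by_cases h : pvGetS b j = pvGetS a i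
      · rw [if_pos h, if_pos h]; omega
      · rw [if_neg h, if_neg h]; omega

lemma pvMfun_step_nomatch (a b : List String) (i t : Nat) (ht : 1 ≤ t)
    (hm : ¬ pvGetS b (t-1) = pvGetS a i) :
    ∀ j, pvMfun a b i (t-1) j = pvMfun a b i t j := by
  intro j
  induction j with
  | zero => rfl
  | succ j ihj =>
    rcases Nat.lt_trichotomy (j+1) t with hlt | heq | hgt
    · rw [pvMfun_succ, if_pos (by omega), pvMfun_succ, if_pos (by omega)]
    · obtain rfl : t = j + 1 := by omega
      simp only [Nat.add_sub_cancel] at hm ⊢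
      rw [pvMfun_succ a b i j j, if_neg (show ¬ j + 1 ≤ j by omega), if_neg hm,
        pvMfun_le_t a b i j j le_rfl, pvMfun_le_t a b i (j+1) (j+1) le_rfl]
      have hmono := (pvLn_mono_step a b i).1 j
      omega
    · rw [pvMfun_succ a b i (t-1) j, if_neg (show ¬ j + 1 ≤ t - 1 by omega),
        pvMfun_succ a b i t j, if_neg (show ¬ j + 1 ≤ t by omega), ihj]

-- ---- binary search lemmas ----
def pvC (thr : List Nat) (j : Nat) : Nat := thr.countP (fun x => decide (x ≤ j))

lemma pv_count_boundary (p : Nat → Bool) :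
    ∀ (xs : List Nat) (r : Nat), r ≤ xs.length →
      (∀ k (h : k < xs.length), k < r → p xs[k]) →
      (∀ k (h : k < xs.length), r ≤ k → ¬ p xs[k]) → xs.countP p = r := by
  intro xs
  induction xs with
  | nil =>
    intro r hr _ _
    have : r = 0 := by simpa using hr
    simp [this]
  | cons x xs ih =>
    intro r hr h1 h2
    cases r with
    | zero =>
      rw [List.countP_cons, if_neg (by simpa using h2 0 (by simp) (by omega)),
        ih 0 (by omega) (by omega) (fun k hk _ => by simpa using h2 (k+1) (by simpa using hk) (by omega))]
    | succ r =>
      rw [List.countP_cons, if_pos (by simpa using h1 0 (by simp) (by omega)),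
        ih r (by simpa using hr)
          (fun k hk hkr => by simpa using h1 (k+1) (by simpa using hk) (by omega))
          (fun k hk hkr => by simpa using h2 (k+1) (by simpa using hk) (by omega))]

lemma pv_sorted_getElem_mono (xs : List Nat) (hs : List.Pairwise (· < ·) xs) :
    ∀ (i j : Nat) (hi : i < xs.length) (hj : j < xs.length), i ≤ j → xs[i] ≤ xs[j] := by
  intro i j hi hj hij
  rcases Nat.lt_or_ge i j with h | h
  · exact le_of_lt ((List.pairwise_iff_getElem.mp hs) i j hi hj h)
  · have : i = j := by omega
    subst this; rfl

lemma pvLowerAux_boundary (xs : List Nat) (v : Nat)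
    (hs : List.Pairwise (· < ·) xs) :
    ∀ (lo hi : Nat), lo ≤ hi → hi ≤ xs.length →
      (∀ k (h : k < xs.length), k < lo → xs[k] < v) →
      (∀ k (h : k < xs.length), hi ≤ k → ¬ xs[k] < v) →
      pvLowerAux xs v lo hi ≤ xs.length ∧
      (∀ k (h : k < xs.length), k < pvLowerAux xs v lo hi → xs[k] < v) ∧
      (∀ k (h : k < xs.length), pvLowerAux xs v lo hi ≤ k → ¬ xs[k] < v) := by
  intro lo hi
  fun_induction pvLowerAux xs v lo hi with
  | case1 lo hi hlh hmid ihm =>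
    intro hle hlen hlow hhigh
    refine ihm (by omega) hlen ?_ hhigh
    intro k hk hklt
    have hmidlt : (lo + hi) / 2 < xs.length := by omega
    have := pv_sorted_getElem_mono xs hs k ((lo+hi)/2) hk hmidlt (by omega)
    rw [List.getD_eq_getElem _ _ hmidlt] at hmid
    omega
  | case2 lo hi hlh hmid ihm =>
    intro hle hlen hlow hhigh
    refine ihm (by omega) (by omega) hlow ?_
    intro k hk hklt
    have hmidlt : (lo + hi) / 2 < xs.length := by omega
    have := pv_sorted_getElem_mono xs hs ((lo+hi)/2) k hmidlt hk (by omega)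
    rw [List.getD_eq_getElem _ _ hmidlt] at hmid
    omega
  | case3 lo hi hlh =>
    intro hle hlen hlow hhigh
    exact ⟨by omega, fun k hk hklt => hlow k hk hklt, fun k hk hklt => hhigh k hk (by omega)⟩

lemma pvLower_eq (xs : List Nat) (v : Nat) (hs : List.Pairwise (· < ·) xs) :
    pvLower xs v = xs.countP (fun x => decide (x < v)) := by
  obtain ⟨hlen, hlow, hhigh⟩ := pvLowerAux_boundary xs v hs 0 xs.length (by omega) le_rfl
    (by omega) (by omega)
  unfold pvLower
  exact (pv_count_boundary _ xs _ hlen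
    (fun k hk hkr => by simpa using hlow k hk hkr)
    (fun k hk hkr => by simpa using hhigh k hk hkr)).symm

lemma pvCountLeAux_boundary (xs : List Nat) (v : Nat)
    (hs : List.Pairwise (· < ·) xs) :
    ∀ (lo hi : Nat), lo ≤ hi → hi ≤ xs.length →
      (∀ k (h : k < xs.length), k < lo → xs[k] ≤ v) →
      (∀ k (h : k < xs.length), hi ≤ k → ¬ xs[k] ≤ v) →
      pvCountLeAux xs v lo hi ≤ xs.length ∧
      (∀ k (h : k < xs.length), k < pvCountLeAux xs v lo hi → xs[k] ≤ v) ∧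
      (∀ k (h : k < xs.length), pvCountLeAux xs v lo hi ≤ k → ¬ xs[k] ≤ v) := by
  intro lo hi
  fun_induction pvCountLeAux xs v lo hi with
  | case1 lo hi hlh hmid ihm =>
    intro hle hlen hlow hhigh
    refine ihm (by omega) hlen ?_ hhigh
    intro k hk hklt
    have hmidlt : (lo + hi) / 2 < xs.length := by omega
    have := pv_sorted_getElem_mono xs hs k ((lo+hi)/2) hk hmidlt (by omega)
    rw [List.getD_eq_getElem _ _ hmidlt] at hmid
    omega
  | case2 lo hi hlh hmid ihm =>
    intro hle hlen hlow hhigh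
    refine ihm (by omega) (by omega) hlow ?_
    intro k hk hklt
    have hmidlt : (lo + hi) / 2 < xs.length := by omega
    have := pv_sorted_getElem_mono xs hs ((lo+hi)/2) k hmidlt hk (by omega)
    rw [List.getD_eq_getElem _ _ hmidlt] at hmid
    omega
  | case3 lo hi hlh =>
    intro hle hlen hlow hhigh
    exact ⟨by omega, fun k hk hklt => hlow k hk hklt, fun k hk hklt => hhigh k hk (by omega)⟩

lemma pvCountLe_eq (xs : List Nat) (v : Nat) (hs : List.Pairwise (· < ·) xs) :
    pvCountLe xs v = pvC xs v := by
  obtain ⟨hlen, hlow, hhigh⟩ := pvCountLeAux_boundary xs v hs 0 xs.length (by omega) le_rfl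
    (by omega) (by omega)
  unfold pvCountLe pvC
  exact (pv_count_boundary _ xs _ hlen
    (fun k hk hkr => by simpa using hlow k hk hkr)
    (fun k hk hkr => by simpa using hhigh k hk hkr)).symm

-- ---- place, in structural form ----
def pvPlaceS : List Nat → Nat → List Nat
  | [], t => [t]
  | x :: xs, t => if x < t then x :: pvPlaceS xs t else t :: xs

lemma pvC_cons (x : Nat) (l : List Nat) (j : Nat) :
    pvC (x :: l) j = (if x ≤ j then 1 else 0) + pvC l j := by
  by_cases h : x ≤ j <;> simp [pvC, List.countP_cons, h] <;> omega

lemma pvPlace_eq_S (thr : List Nat) (t : Nat) :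
    List.Pairwise (· < ·) thr → pvPlace thr t = pvPlaceS thr t := by
  induction thr with
  | nil =>
    intro hs
    unfold pvPlace
    rw [pvLower_eq [] t hs]
    simp [pvPlaceS]
  | cons x xs ih =>
    intro hs
    obtain ⟨hall, hs'⟩ := List.pairwise_cons.mp hs
    have ihe : (if xs.countP (fun y => decide (y < t)) = xs.length then xs ++ [t]
        else xs.set (xs.countP (fun y => decide (y < t))) t) = pvPlaceS xs t := by
      rw [← ih hs']
      unfold pvPlace
      rw [pvLower_eq xs t hs']
    unfold pvPlace
    rw [pvLower_eq (x :: xs) t hs]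
    by_cases hx : x < t
    · have hk : (x :: xs).countP (fun y => decide (y < t))
          = xs.countP (fun y => decide (y < t)) + 1 := by
        simp [List.countP_cons, hx]
      rw [hk]
      simp only [pvPlaceS, if_pos hx, List.length_cons]
      by_cases hlen : xs.countP (fun y => decide (y < t)) = xs.length
      · rw [if_pos (by omega), ← ihe, if_pos hlen]
        rfl
      · rw [if_neg (by omega), ← ihe, if_neg hlen]
        rfl
    · have h0 : xs.countP (fun y => decide (y < t)) = 0 := by
        rw [List.countP_eq_zero]
        intro y hy
        have := hall y hy
        simp
        omega
      have hk : (x :: xs).countP (fun y => decide (y < t)) = 0 := by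
        simp [List.countP_cons, hx, h0]
      rw [hk, if_neg (by simp)]
      simp only [pvPlaceS, if_neg hx]
      rfl

lemma pvPlaceS_mem (thr : List Nat) (t : Nat) :
    ∀ y ∈ pvPlaceS thr t, y ∈ thr ∨ y = t := by
  induction thr with
  | nil => intro y hy; simp only [pvPlaceS] at hy; simp at hy; right; exact hy
  | cons x xs ih =>
    intro y hy
    simp only [pvPlaceS] at hy
    by_cases hx : x < t
    · rw [if_pos hx] at hy
      rcases List.mem_cons.mp hy with h | h
      · left; simp [h]
      · rcases ih y h with h2 | h2
        · left; simp [h2]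
        · right; exact h2
    · rw [if_neg hx] at hy
      rcases List.mem_cons.mp hy with h | h
      · right; exact h
      · left; simp [h]

lemma pvPlaceS_sorted (thr : List Nat) (t : Nat) :
    List.Pairwise (· < ·) thr → List.Pairwise (· < ·) (pvPlaceS thr t) := by
  induction thr with
  | nil => intro _; simp [pvPlaceS]
  | cons x xs ih =>
    intro hs
    obtain ⟨hall, hs'⟩ := List.pairwise_cons.mp hs
    simp only [pvPlaceS]
    by_cases hx : x < t
    · rw [if_pos hx]
      refine List.pairwise_cons.mpr ⟨?_, ih hs'⟩
      intro y hy
      rcases pvPlaceS_mem xs t y hy with h | h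
      · exact hall y h
      · omega
    · rw [if_neg hx]
      refine List.pairwise_cons.mpr ⟨?_, hs'⟩
      intro y hy
      have := hall y hy
      omega

lemma pvPlaceS_count (thr : List Nat) (t : Nat) (ht : 1 ≤ t) :
    List.Pairwise (· < ·) thr →
    ∀ j, pvC (pvPlaceS thr t) j =
      if j < t then pvC thr j else max (pvC thr j) (pvC thr (t-1) + 1) := by
  induction thr with
  | nil =>
    intro _ j
    simp only [pvPlaceS, pvC_cons]
    have h0 : pvC ([] : List Nat) j = 0 := rfl
    have h1 : pvC ([] : List Nat) (t-1) = 0 := rfl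
    rw [h0, h1]
    split_ifs <;> omega
  | cons x xs ih =>
    intro hs j
    obtain ⟨hall, hs'⟩ := List.pairwise_cons.mp hs
    simp only [pvPlaceS]
    by_cases hx : x < t
    · rw [if_pos hx, pvC_cons, ih hs' j, pvC_cons, pvC_cons]
      split_ifs <;> omega
    · have h0 : pvC xs (t-1) = 0 := by
        rw [pvC, List.countP_eq_zero]
        intro y hy
        have := hall y hy
        simp
        omega
      have hxj : ¬ x ≤ j → pvC xs j = 0 := by
        intro hj
        rw [pvC, List.countP_eq_zero]
        intro y hy
        have := hall y hy
        simp
        omega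
      rw [if_neg hx, pvC_cons, pvC_cons, pvC_cons, h0]
      by_cases hxl : x ≤ j
      · split_ifs <;> omega
      · have := hxj hxl
        split_ifs <;> omega

-- ---- row invariant ----
def pvThrI (a b : List String) : Nat → List Nat
  | 0 => []
  | i+1 => pvRowThr (pvGetS a i) b b.length (pvThrI a b i)

def pvRep (a b : List String) (i : Nat) (thr : List Nat) : Prop :=
  List.Pairwise (· < ·) thr ∧ (∀ x ∈ thr, 1 ≤ x ∧ x ≤ b.length) ∧
  ∀ j, j ≤ b.length → pvC thr j = pvLn a b i j

lemma pvRowThr_spec (a b : List String) (i : Nat) :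
    ∀ (t : Nat), t ≤ b.length → ∀ (thr : List Nat),
      List.Pairwise (· < ·) thr → (∀ x ∈ thr, 1 ≤ x ∧ x ≤ b.length) →
      (∀ j, j ≤ b.length → pvC thr j = pvMfun a b i t j) →
      List.Pairwise (· < ·) (pvRowThr (pvGetS a i) b t thr) ∧
      (∀ x ∈ pvRowThr (pvGetS a i) b t thr, 1 ≤ x ∧ x ≤ b.length) ∧
      (∀ j, j ≤ b.length → pvC (pvRowThr (pvGetS a i) b t thr) j = pvMfun a b i 0 j) := by
  intro t
  induction t with
  | zero =>
    intro _ thr h1 h2 h3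
    exact ⟨h1, h2, h3⟩
  | succ t iht =>
    intro ht thr h1 h2 h3
    have hunf : pvRowThr (pvGetS a i) b (t+1) thr =
        pvRowThr (pvGetS a i) b t
          (if pvGetS b t = pvGetS a i then pvPlace thr (t+1) else thr) := rfl
    rw [hunf]
    by_cases hm : pvGetS b t = pvGetS a i
    · rw [if_pos hm]
      rw [pvPlace_eq_S thr (t+1) h1]
      have hstep := pvMfun_step_match a b i (t+1) (by omega) (by simpa using hm)
      refine iht (by omega) _ (pvPlaceS_sorted thr (t+1) h1) ?_ ?_
      · intro x hx
        rcases pvPlaceS_mem thr (t+1) x hx with h | h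
        · exact h2 x h
        · omega
      · intro j hj
        rw [pvPlaceS_count thr (t+1) (by omega) h1 j]
        have hred : (t + 1) - 1 = t := by omega
        rw [hred]
        have hs := hstep j
        rw [hred] at hs
        rw [hs, h3 j hj, h3 t (by omega),
          pvMfun_le_t a b i (t+1) t (by omega)]
        by_cases hjt : j < t + 1
        · rw [if_pos hjt, if_pos hjt, pvMfun_le_t a b i (t+1) j (by omega)]
        · rw [if_neg hjt, if_neg hjt]
    · rw [if_neg hm]
      have hstep := pvMfun_step_nomatch a b i (t+1) (by omega) (by simpa using hm)
      refine iht (by omega) thr h1 h2 ?_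
      intro j hj
      rw [h3 j hj]
      have hs := hstep j
      rw [show (t + 1) - 1 = t by omega] at hs
      exact hs.symm

lemma pvThrI_rep (a b : List String) : ∀ i, i ≤ a.length → pvRep a b i (pvThrI a b i) := by
  intro i
  induction i with
  | zero =>
    intro _
    refine ⟨List.Pairwise.nil, fun x hx => absurd hx (List.not_mem_nil), ?_⟩
    intro j _
    rw [pvLn_zero_left]
    rfl
  | succ i ih =>
    intro hi
    obtain ⟨h1, h2, h3⟩ := ih (by omega)
    have h3' : ∀ j, j ≤ b.length → pvC (pvThrI a b i) j = pvMfun a b i b.length j := by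
      intro j hj
      rw [h3 j hj, pvMfun_le_t a b i b.length j hj]
    obtain ⟨g1, g2, g3⟩ := pvRowThr_spec a b i b.length le_rfl (pvThrI a b i) h1 h2 h3'
    refine ⟨g1, g2, ?_⟩
    intro j hj
    show pvC (pvRowThr (pvGetS a i) b b.length (pvThrI a b i)) j = pvLn a b (i+1) j
    rw [g3 j hj, pvMfun_zero]

lemma pvRowsB_eq (a b : List String) :
    pvRowsB a b = (List.range (a.length + 1)).map (pvThrI a b) := by
  have main : ∀ k, k ≤ a.length →
      ((a.take k).foldl (fun (st : List (List Nat) × List Nat) line =>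
          let thr := pvRowThr line b b.length st.2
          (st.1 ++ [thr], thr)) ([[]], [])) =
      ((List.range (k+1)).map (pvThrI a b), pvThrI a b k) := by
    intro k
    induction k with
    | zero =>
      intro _
      simp [pvThrI]
    | succ k ih =>
      intro hk
      have ht : a.take (k+1) = a.take k ++ [a[k]'(by omega)] := by
        rw [List.take_add_one, List.getElem?_eq_getElem (by omega)]
        rfl
      rw [ht, List.foldl_append, ih (by omega), List.foldl_cons, List.foldl_nil]
      have hak : a[k]'(by omega) = pvGetS a k := by
        unfold pvGetS
        rw [List.getD_eq_getElem _ _ (by omega)]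
      dsimp only
      rw [hak]
      rw [Prod.ext_iff]
      constructor
      · dsimp only
        rw [show List.range (k+1+1) = List.range (k+1) ++ [k+1] from List.range_succ,
          List.map_append]
        rfl
      · rfl
  unfold pvRowsB
  conv_lhs => rw [show a = a.take a.length from (List.take_length ..).symm]
  rw [main a.length le_rfl]

lemma pvRows_getD (a b : List String) (i : Nat) (hi : i ≤ a.length) :
    (pvRowsB a b).getD i [] = pvThrI a b i := by
  rw [pvRowsB_eq]
  exact pv_getD_map_range _ _ (by omega)

lemma pvCountLe_rows (a b : List String) (i v : Nat) (hi : i ≤ a.length) (hv : v ≤ b.length) :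
    pvCountLe ((pvRowsB a b).getD i []) v = pvLn a b i v := by
  obtain ⟨h1, _, h3⟩ := pvThrI_rep a b i hi
  rw [pvRows_getD a b i hi, pvCountLe_eq _ _ h1, h3 v hv]

-- ---- walk equality ----
lemma pv_walk_eq_back (a b : List String) :
    ∀ fuel i j, i ≤ a.length → j ≤ b.length →
      pvBackA a b (diff_lcs_table a b) fuel i j =
      pvWalkB a b (pvRowsB a b) fuel i j := by
  intro fuel
  induction fuel with
  | zero => intro i j _ _; rfl
  | succ f ih =>
    intro i j hi hj
    rw [pvBackA, pvWalkB]
    by_cases h0 : 0 < i ∨ 0 < j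
    · rw [if_pos h0, if_pos h0]
      by_cases h1 : 0 < i ∧ 0 < j ∧ pvGetS a (i-1) = pvGetS b (j-1)
      · rw [if_pos h1, if_pos h1]
        exact congrArg _ (ih (i-1) (j-1) (by omega) (by omega))
      · rw [if_neg h1, if_neg h1]
        have hcond : (0 < j ∧ (i = 0 ∨ pvGet2 (diff_lcs_table a b) i (j-1) ≥
              pvGet2 (diff_lcs_table a b) (i-1) j)) ↔
            (0 < j ∧ (i = 0 ∨ pvCountLe ((pvRowsB a b).getD i []) (j-1) ≥
              pvCountLe ((pvRowsB a b).getD (i-1) []) j)) := by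
          by_cases hjp : 0 < j
          · rw [pv_tableA_get a b i (j-1) hi (by omega),
              pv_tableA_get a b (i-1) j (by omega) hj,
              pvCountLe_rows a b i (j-1) hi (by omega),
              pvCountLe_rows a b (i-1) j (by omega) hj,
              pvL_eq_pvLn, pvL_eq_pvLn]
            constructor
            · rintro ⟨_, h⟩
              refine ⟨hjp, ?_⟩
              rcases h with h | h
              · left; exact h
              · right; exact_mod_cast h
            · rintro ⟨_, h⟩
              refine ⟨hjp, ?_⟩
              rcases h with h | h
              · left; exact h
              · right; exact_mod_cast h
          · constructor
            · rintro ⟨h, _⟩; omega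
            · rintro ⟨h, _⟩; omega
        by_cases h2 : 0 < j ∧ (i = 0 ∨ pvGet2 (diff_lcs_table a b) i (j-1) ≥
            pvGet2 (diff_lcs_table a b) (i-1) j)
        · rw [if_pos h2, if_pos (hcond.mp h2)]
          exact congrArg _ (ih i (j-1) hi (by omega))
        · rw [if_neg h2, if_neg (fun hc => h2 (hcond.mpr hc))]
          exact congrArg _ (ih (i-1) j (by omega) hj)
    · rw [if_neg h0, if_neg h0]

lemma pv_revA_take (r : List (List String)) :
    ∀ k, k ≤ r.length → pvRevA r k = (r.take k).reverse := by
  intro k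
  induction k with
  | zero => intro _; rfl
  | succ k ih =>
    intro hk
    have ht : r.take (k+1) = r.take k ++ [r[k]'(by omega)] := by
      rw [List.take_add_one, List.getElem?_eq_getElem (by omega)]
      rfl
    rw [pvRevA, ih (by omega), ht, List.reverse_append,
      List.getD_eq_getElem?_getD, List.getElem?_eq_getElem (show k < r.length by omega)]
    rfl

lemma pv_revA_eq (r : List (List String)) : pvRevA r r.length = r.reverse := by
  rw [pv_revA_take r r.length le_rfl, List.take_length]

-- ===== VERDICT (by name: the statement is the Claim_ definition above) =====
theorem compute_diff_ops_spec : Claim_equal_compute_diff_ops := by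
  intro a b _
  show compute_diff_ops a b = compute_diff_ops_alt a b
  unfold compute_diff_ops compute_diff_ops_alt
  dsimp only
  rw [pv_walk_eq_back a b _ a.length b.length le_rfl le_rfl, pv_revA_eq]
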